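-- pv_equiv track=rewrite | github.com/raeez/chiral-bar-cobar | compute/lib/mzv_bar_complex.py | _word_to_mzv_indices
-- ===== SOURCE A (Python) =====
-- from typing import Any, Dict, List, Optional, Sequence, Tuple, Union
--
-- def _word_to_mzv_indices(word: Tuple[int, ...]) -> Optional[List[int]]:
--     """Convert a word e_0^{a_1-1} e_1 ... e_0^{a_k-1} e_1 to [a_1,...,a_k].
--
--     Returns None if the word doesn't have this form (doesn't end with 1
--     or starts with 1).
--     """
--     if not word or word[-1] != 1:
--         return None
--
--     indices = []
--     current_zeros = 0
--     for letter in word: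
--         if letter == 0:
--             current_zeros += 1
--         else:  # letter == 1
--             indices.append(current_zeros + 1)
--             current_zeros = 0
--     return indices
-- ===== SOURCE B (Python) =====
-- def _word_to_mzv_indices(word):
--     """Convert a word e_0^{a_1-1} e_1 ... e_0^{a_k-1} e_1 to [a_1,...,a_k].
--
--     Two-phase: collect the positions of the non-zero markers, then take
--     consecutive differences (with a virtual marker at position -1).
--     """
--     if not word or word[-1] != 1:
--         return None
--     positions = [i for i, letter in enumerate(word) if letter != 0]
--     out = [positions[0] + 1]
--     for j in range(1, len(positions)):
--         out.append(positions[j] - positions[j - 1])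
--     return out
-- ===== Notes on version B (the rewrite author's own statement) =====
-- stated objective: alternative
-- what changed: Replaces the single pass with a running zero counter by a two-phase decomposition: first collect the positions of all non-zero markers, then produce the indices as consecutive position differences (first position + 1, then successive gaps).
import Mathlib
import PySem

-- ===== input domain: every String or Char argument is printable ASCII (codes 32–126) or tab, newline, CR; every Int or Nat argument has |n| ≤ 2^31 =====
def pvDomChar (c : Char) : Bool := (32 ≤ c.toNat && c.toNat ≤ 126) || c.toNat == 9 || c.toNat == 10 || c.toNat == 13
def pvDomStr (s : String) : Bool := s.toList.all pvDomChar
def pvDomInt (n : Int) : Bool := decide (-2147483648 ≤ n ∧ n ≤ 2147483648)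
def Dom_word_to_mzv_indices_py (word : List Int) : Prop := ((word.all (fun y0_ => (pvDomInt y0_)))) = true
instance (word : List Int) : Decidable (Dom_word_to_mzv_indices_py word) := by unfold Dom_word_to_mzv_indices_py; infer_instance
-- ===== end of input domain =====

-- B replaces A's running zero counter by a two-phase pass: collect non-zero marker
-- positions, then take consecutive differences (objective: alternative decomposition).

-- ===== PORT A =====
-- the for-loop over the word with state (indices, current_zeros)
def word_to_mzv_indices_py (word : List Int) : Option (List Int) :=
  if word = [] ∨ PySem.List.pyGet? word (-1) ≠ some 1 then none
  else
    let st := word.foldl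
      (fun (s : List Int × Int) letter =>
        if letter = 0 then (s.1, s.2 + 1) else (s.1 ++ [s.2 + 1], 0))
      ([], 0)
    some st.1

-- ===== PORT B =====
-- the 'for j in range(1, len(positions))' loop: prev carries positions[j-1]
def pvDiffLoop : List Int → Int → List Int
  | [], _ => []
  | q :: t, p => (q - p) :: pvDiffLoop t q

def word_to_mzv_indices_py_alt (word : List Int) : Option (List Int) :=
  if word = [] ∨ PySem.List.pyGet? word (-1) ≠ some 1 then none
  else
    let positions := ((PySem.List.enumerate word 0).filter (fun p => p.2 ≠ 0)).map (·.1)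
    match positions with
    | [] => none  -- unreachable: the guard makes the last letter a non-zero marker
    | p :: rest => some ((p + 1) :: pvDiffLoop rest p)

-- ===== PRECONDITION & SPEC =====
def Spec_word_to_mzv_indices_py (word : List Int) (out : Option (List Int)) : Prop := out = word_to_mzv_indices_py_alt word
instance (word : List Int) (out : Option (List Int)) : Decidable (Spec_word_to_mzv_indices_py word out) := by unfold Spec_word_to_mzv_indices_py; infer_instance

-- ===== CLAIM (what is proved, stated in full; the proofs are below) =====
def Claim_equal_word_to_mzv_indices_py : Prop := ∀ (word : List Int), Dom_word_to_mzv_indices_py word → Spec_word_to_mzv_indices_py word (word_to_mzv_indices_py word)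

-- ===== LEMMAS AND PROOFS =====

-- recursive form of A's loop result
def pvFA : List Int → Int → List Int
  | [], _ => []
  | l :: t, z => if l = 0 then pvFA t (z + 1) else (z + 1) :: pvFA t 0

lemma pvFoldl_eq (w : List Int) : ∀ (acc : List Int) (z : Int),
    (w.foldl (fun (s : List Int × Int) letter =>
        if letter = 0 then (s.1, s.2 + 1) else (s.1 ++ [s.2 + 1], 0)) (acc, z)).1
      = acc ++ pvFA w z := by
  induction w with
  | nil => intro acc z; simp [pvFA]
  | cons l t ih =>
    intro acc z
    by_cases h : l = 0 <;> simp [pvFA, h, ih]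

lemma pvFA_eq_diff (w : List Int) : ∀ (i z : Int),
    pvFA w z = pvDiffLoop (((PySem.List.enumerate w i).filter (fun p => p.2 ≠ 0)).map (·.1)) (i - z - 1) := by
  induction w with
  | nil => intro i z; simp [pvFA, PySem.List.enumerate_nil, pvDiffLoop]
  | cons l t ih =>
    intro i z
    by_cases h : l = 0
    · have : i - z - 1 = (i + 1) - (z + 1) - 1 := by ring
      simp [pvFA, h, PySem.List.enumerate_cons, this, ih (i + 1) (z + 1)]
    · have h1 : i - (i - z - 1) = z + 1 := by ring
      have h2 : (i : Int) + 1 - 0 - 1 = i := by ring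
      have ht := ih (i + 1) 0
      rw [h2] at ht
      simp [pvFA, h, PySem.List.enumerate_cons, pvDiffLoop, h1] at ht ⊢
      exact ht

lemma pvPositions_ne_nil (ws : List Int) :
    (((PySem.List.enumerate (ws ++ [1]) 0).filter (fun p => p.2 ≠ 0)).map (·.1)) ≠ [] := by
  simp [PySem.List.enumerate_append, PySem.List.enumerate_cons]

-- ===== VERDICT (by name: the statement is the Claim_ definition above) =====
theorem word_to_mzv_indices_py_spec : Claim_equal_word_to_mzv_indices_py := by
  intro word _
  unfold Spec_word_to_mzv_indices_py word_to_mzv_indices_py word_to_mzv_indices_py_alt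
  by_cases hg : word = [] ∨ PySem.List.pyGet? word (-1) ≠ some 1
  · simp [hg]
  · simp only [hg, if_false]
    rw [not_or, not_ne_iff] at hg
    obtain ⟨hne, hlast⟩ := hg
    rw [PySem.List.pyGet?_neg_one] at hlast
    obtain ⟨ws, x, rfl⟩ := (List.eq_nil_or_concat word).resolve_left hne
    have hx : x = 1 := by simpa using hlast
    subst hx
    have hfold := pvFoldl_eq (ws ++ [1]) [] 0
    have hdiff := pvFA_eq_diff (ws ++ [1]) 0 0
    rcases hpos : (((PySem.List.enumerate (ws ++ [1]) 0).filter (fun p => p.2 ≠ 0)).map (·.1)) with _ | ⟨p, rest⟩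
    · exact absurd hpos (pvPositions_ne_nil ws)
    · simp only [hpos] at hdiff
      simp only [List.concat_eq_append, hpos, hfold, hdiff, pvDiffLoop, List.nil_append]
      have hp : p - (0 - 0 - 1) = p + 1 := by ring
      rw [hp]
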